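-- pv_equiv track=rewrite | github.com/abhiwebshar/gcp-doc-parser | test_llm_parser.py | deduplicate_chunks
-- ===== SOURCE A (Python) =====
-- def deduplicate_chunks(chunks: list[dict]) -> str:
--     """
--     Combine chunks while removing duplicate/overlapping content.
--     Uses line-based deduplication to handle chunk overlaps.
--     """
--     if not chunks:
--         return ""
--
--     # Extract text from each chunk and clean up
--     all_lines = []
--     seen_lines = set()
--
--     for chunk in chunks:
--         text = chunk['text'].strip()
--         # Remove markdown code fence if present (LLM parser sometimes wraps in ```markdown)
--         if text.startswith('```markdown'):
--             text = text[len('```markdown'):].strip()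
--         if text.endswith('```'):
--             text = text[:-3].strip()
--
--         # Split into lines and deduplicate
--         for line in text.split('\n'):
--             # Normalize line for comparison (strip whitespace)
--             normalized = line.strip()
--             # Skip empty lines for dedup check but keep them for formatting
--             if not normalized:
--                 all_lines.append(line)
--                 continue
--             # Skip if we've seen this line (handles overlap)
--             if normalized in seen_lines:
--                 continue
--             seen_lines.add(normalized)
--             all_lines.append(line)
--
--     return '\n'.join(all_lines)
-- ===== SOURCE B (Python) =====
-- def deduplicate_chunks(chunks: list[dict]) -> str:
--     # Phase 1: flatten all chunks into one list of cleaned raw lines.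
--     lines = []
--     for chunk in chunks:
--         t = chunk['text'].strip()
--         if t.startswith('```markdown'):
--             t = t[len('```markdown'):].strip()
--         if t.endswith('```'):
--             t = t[:-3].strip()
--         lines.extend(t.split('\n'))
--     # Phase 2: map each normalized non-blank line to its first global index.
--     first = {}
--     for i, line in enumerate(lines):
--         n = line.strip()
--         if n and n not in first:
--             first[n] = i
--     # Phase 3: pure filter — keep blank lines and each first occurrence.
--     return '\n'.join(line for i, line in enumerate(lines)
--                      if not line.strip() or first[line.strip()] == i)
-- ===== Notes on version B (the rewrite author's own statement) =====
-- stated objective: alternative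
-- what changed: Replaces A's online seen-set accumulator with a first-occurrence index: flatten all cleaned lines, build a dict mapping each normalized non-blank line to its first global index in a separate pass, then emit the result as a pure filter keeping blank lines and lines whose index equals their first occurrence.
import Mathlib
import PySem

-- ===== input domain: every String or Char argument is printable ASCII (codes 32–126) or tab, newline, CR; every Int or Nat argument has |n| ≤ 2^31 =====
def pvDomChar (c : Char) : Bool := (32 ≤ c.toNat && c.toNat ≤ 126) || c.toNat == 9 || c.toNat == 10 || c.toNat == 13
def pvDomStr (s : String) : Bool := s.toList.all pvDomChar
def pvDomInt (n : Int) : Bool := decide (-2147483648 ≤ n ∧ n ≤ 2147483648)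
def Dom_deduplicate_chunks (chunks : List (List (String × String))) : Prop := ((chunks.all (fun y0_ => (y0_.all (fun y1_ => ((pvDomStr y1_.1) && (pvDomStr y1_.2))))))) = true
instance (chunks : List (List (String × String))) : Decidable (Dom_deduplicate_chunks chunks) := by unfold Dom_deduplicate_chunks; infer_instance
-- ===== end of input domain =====

-- B replaces A's online seen-set with a precomputed first-occurrence index (dict of normalized
-- line → first global index) and emits the output as a pure filter; objective: alternative.

-- ===== PORT A =====
def deduplicate_chunks (chunks : List (List (String × String))) : String :=
  if chunks = [] then ""
  else
    let st := chunks.foldl (fun (st : List String × PySem.Set String) chunk =>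
      let text := PySem.Str.strip ((PySem.Dict.ofList chunk).getD "text" "")
      let text := if PySem.Str.startswith text "```markdown" then
          PySem.Str.strip (PySem.Str.slice text (some 11) none) else text
      let text := if PySem.Str.endswith text "```" then
          PySem.Str.strip (PySem.Str.slice text none (some (-3))) else text
      ((PySem.Str.split? text "\n").getD []).foldl (fun (st : List String × PySem.Set String) line =>
        let normalized := PySem.Str.strip line
        if normalized = "" then (st.1 ++ [line], st.2)
        else if PySem.Set.contains st.2 normalized then st
        else (st.1 ++ [line], PySem.Set.add st.2 normalized)) st)
      ([], PySem.Set.empty)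
    PySem.Str.join "\n" st.1

-- ===== PORT B =====
-- the cleaned line list of one chunk (phase 1 body of Source B)
def pvClean (chunk : List (String × String)) : List String :=
  let text := PySem.Str.strip ((PySem.Dict.ofList chunk).getD "text" "")
  let text := if PySem.Str.startswith text "```markdown" then
      PySem.Str.strip (PySem.Str.slice text (some 11) none) else text
  let text := if PySem.Str.endswith text "```" then
      PySem.Str.strip (PySem.Str.slice text none (some (-3))) else text
  (PySem.Str.split? text "\n").getD []

-- phase 2 of Source B: 'for i, line in enumerate(lines): if n and n not in first: first[n] = i'
def pvFirst (d : PySem.Dict String Int) (i : Int) : List String → PySem.Dict String Int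
  | [] => d
  | line :: rest =>
      let n := PySem.Str.strip line
      if n ≠ "" ∧ (d.get? n).isNone then pvFirst (d.insert n i) (i + 1) rest
      else pvFirst d (i + 1) rest

-- phase 3 of Source B: the filtering comprehension; 'first[line.strip()] == i' is exact as
-- 'get? = some i' because every non-blank normalized line is a key of the dict.
def pvKept (d : PySem.Dict String Int) (i : Int) : List String → List String
  | [] => []
  | line :: rest =>
      if PySem.Str.strip line = "" ∨ d.get? (PySem.Str.strip line) = some i
      then line :: pvKept d (i + 1) rest
      else pvKept d (i + 1) rest

def deduplicate_chunks_alt (chunks : List (List (String × String))) : String :=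
  let lines := chunks.foldl (fun acc c => acc ++ pvClean c) []
  let first := pvFirst PySem.Dict.empty 0 lines
  PySem.Str.join "\n" (pvKept first 0 lines)

-- ===== PRECONDITION & SPEC =====
-- Pre_ excludes only inputs where a chunk lacks the 'text' key, on which Python A raises KeyError.
def Pre_deduplicate_chunks (chunks : List (List (String × String))) : Prop :=
  (chunks.all (fun c => c.any (fun kv => kv.1 == "text"))) = true
instance (chunks : List (List (String × String))) : Decidable (Pre_deduplicate_chunks chunks) := by unfold Pre_deduplicate_chunks; infer_instance
def pvWitness_deduplicate_chunks : (List (List (String × String))) :=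
  [[("text", "a\nb\na")], [("text", "```markdown\nb\nc\n```")]]
def Spec_deduplicate_chunks (chunks : List (List (String × String))) (out : String) : Prop := out = deduplicate_chunks_alt chunks
instance (chunks : List (List (String × String))) (out : String) : Decidable (Spec_deduplicate_chunks chunks out) := by unfold Spec_deduplicate_chunks; infer_instance

-- ===== CLAIM =====
def Claim_equal_deduplicate_chunks : Prop := ∀ (chunks : List (List (String × String))), Dom_deduplicate_chunks chunks → Pre_deduplicate_chunks chunks → Spec_deduplicate_chunks chunks (deduplicate_chunks chunks)

-- ===== LEMMAS AND PROOFS =====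

-- A's inner loop body, named for the proof (definitionally the lambda in the port of A)
def pvAStep (st : List String × PySem.Set String) (line : String) : List String × PySem.Set String :=
  let normalized := PySem.Str.strip line
  if normalized = "" then (st.1 ++ [line], st.2)
  else if PySem.Set.contains st.2 normalized then st
  else (st.1 ++ [line], PySem.Set.add st.2 normalized)

-- pvFirst never overwrites a key that is already present
lemma pvFirst_get?_of_isSome (l : List String) (d : PySem.Dict String Int) (i : Int)
    (n : String) (h : (d.get? n).isSome) : (pvFirst d i l).get? n = d.get? n := by
  induction l generalizing d i with
  | nil => rfl
  | cons x xs ih =>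
    simp only [pvFirst]
    split_ifs with hc
    · have hxn : n ≠ PySem.Str.strip x := by
        intro e; rw [← e] at hc; rw [Option.isNone_iff_eq_none] at hc
        rw [hc.2] at h; simp at h
      rw [ih (d.insert (PySem.Str.strip x) i) (i + 1)
            (by rw [PySem.Dict.get?_insert_of_ne _ _ hxn]; exact h),
          PySem.Dict.get?_insert_of_ne _ _ hxn]
    · exact ih d (i + 1) h

-- main invariant: A's online fold equals B's first-index filter
lemma pvMain (l : List String) (acc : List String) (s : PySem.Set String)
    (d : PySem.Dict String Int) (i : Int)
    (hagree : ∀ m, m ∈ s ↔ (d.get? m).isSome = true)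
    (hbound : ∀ m j, d.get? m = some j → j < i) :
    (l.foldl pvAStep (acc, s)).1 = acc ++ pvKept (pvFirst d i l) i l := by
  induction l generalizing acc s d i with
  | nil => simp [pvKept]
  | cons x xs ih =>
    by_cases hn : PySem.Str.strip x = ""
    · -- blank line: both keep it unconditionally
      have hstep : pvAStep (acc, s) x = (acc ++ [x], s) := by simp [pvAStep, hn]
      have hfirst : pvFirst d i (x :: xs) = pvFirst d (i + 1) xs := by
        simp [pvFirst, hn]
      rw [List.foldl_cons, hstep, hfirst,
          ih (acc ++ [x]) s d (i + 1) hagree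
            (fun m j hj => lt_trans (hbound m j hj) (by omega))]
      simp [pvKept, hn, List.append_assoc]
    · by_cases hm : PySem.Str.strip x ∈ s
      · -- already seen: A skips; the dict holds an earlier index j < i
        obtain ⟨j, hj⟩ := Option.isSome_iff_exists.mp ((hagree _).mp hm)
        have hstep : pvAStep (acc, s) x = (acc, s) := by
          simp [pvAStep, hn, hm]
        have hfirst : pvFirst d i (x :: xs) = pvFirst d (i + 1) xs := by
          simp [pvFirst, hn, hj]
        have hget : (pvFirst d (i + 1) xs).get? (PySem.Str.strip x) = some j := by
          rw [pvFirst_get?_of_isSome xs d (i + 1) _ (by simp [hj])]; exact hj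
        have hji : j < i := hbound _ _ hj
        rw [List.foldl_cons, hstep, hfirst,
            ih acc s d (i + 1) hagree
              (fun m j hj => lt_trans (hbound m j hj) (by omega))]
        have hne : ¬ (PySem.Str.strip x = "" ∨
            (pvFirst d (i + 1) xs).get? (PySem.Str.strip x) = some i) := by
          rintro (h | h)
          · exact hn h
          · rw [hget] at h; exact absurd (Option.some.inj h) (by omega)
        simp only [pvKept]
        rw [if_neg hne]
      · -- new line: A appends and records; the dict gets index i, kept by the filter
        have hnone : d.get? (PySem.Str.strip x) = none := by
          cases h : d.get? (PySem.Str.strip x) with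
          | none => rfl
          | some j => exact absurd ((hagree _).mpr (by simp [h])) hm
        have hstep : pvAStep (acc, s) x =
            (acc ++ [x], PySem.Set.add s (PySem.Str.strip x)) := by
          simp [pvAStep, hn, hm]
        have hfirst : pvFirst d i (x :: xs) =
            pvFirst (d.insert (PySem.Str.strip x) i) (i + 1) xs := by
          simp [pvFirst, hn, hnone]
        have hget : (pvFirst (d.insert (PySem.Str.strip x) i) (i + 1) xs).get?
            (PySem.Str.strip x) = some i := by
          rw [pvFirst_get?_of_isSome xs _ (i + 1) _
                (by simp [PySem.Dict.get?_insert_self])]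
          simp [PySem.Dict.get?_insert_self]
        have hagree' : ∀ m, m ∈ PySem.Set.add s (PySem.Str.strip x) ↔
            (((d.insert (PySem.Str.strip x) i).get? m).isSome = true) := by
          intro m
          rw [PySem.Set.mem_add]
          by_cases e : m = PySem.Str.strip x
          · subst e; simp [PySem.Dict.get?_insert_self]
          · simp [PySem.Dict.get?_insert, e, hagree m]
        have hbound' : ∀ m j, (d.insert (PySem.Str.strip x) i).get? m = some j →
            j < i + 1 := by
          intro m j hj
          by_cases e : m = PySem.Str.strip x
          · subst e; rw [PySem.Dict.get?_insert_self] at hj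
            cases hj; omega
          · rw [PySem.Dict.get?_insert] at hj
            rw [if_neg e] at hj
            exact lt_trans (hbound m j hj) (by omega)
        rw [List.foldl_cons, hstep, hfirst,
            ih (acc ++ [x]) _ _ (i + 1) hagree' hbound']
        simp only [pvKept]
        rw [if_pos (Or.inr hget)]
        simp [List.append_assoc]

-- nested loop = fold of the step over the flattened line list
lemma pvNestedFold (chunks : List (List (String × String)))
    (st : List String × PySem.Set String) :
    chunks.foldl (fun st chunk => (pvClean chunk).foldl pvAStep st) st
      = (chunks.flatMap pvClean).foldl pvAStep st := by
  induction chunks generalizing st with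
  | nil => rfl
  | cons c cs ih => simp [List.flatMap_cons, List.foldl_append, ih]

-- Source B's extend-loop builds the flattened list
lemma pvFoldlAppend (chunks : List (List (String × String))) (acc : List String) :
    chunks.foldl (fun acc c => acc ++ pvClean c) acc = acc ++ chunks.flatMap pvClean := by
  induction chunks generalizing acc with
  | nil => simp
  | cons c cs ih => simp [List.flatMap_cons, ih, List.append_assoc]

-- ===== VERDICT =====
theorem deduplicate_chunks_spec : Claim_equal_deduplicate_chunks := by
  intro chunks _ _
  unfold Spec_deduplicate_chunks deduplicate_chunks deduplicate_chunks_alt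
  by_cases h : chunks = []
  · subst h; rfl
  · simp only [if_neg h]
    rw [show (fun (st : List String × PySem.Set String) chunk =>
        let text := PySem.Str.strip ((PySem.Dict.ofList chunk).getD "text" "")
        let text := if PySem.Str.startswith text "```markdown" then
            PySem.Str.strip (PySem.Str.slice text (some 11) none) else text
        let text := if PySem.Str.endswith text "```" then
            PySem.Str.strip (PySem.Str.slice text none (some (-3))) else text
        ((PySem.Str.split? text "\n").getD []).foldl (fun (st : List String × PySem.Set String) line =>
          let normalized := PySem.Str.strip line
          if normalized = "" then (st.1 ++ [line], st.2)
          else if PySem.Set.contains st.2 normalized then st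
          else (st.1 ++ [line], PySem.Set.add st.2 normalized)) st)
      = (fun st chunk => (pvClean chunk).foldl pvAStep st) from rfl]
    rw [pvNestedFold chunks ([], PySem.Set.empty),
        show chunks.foldl (fun acc c => acc ++ pvClean c) [] = chunks.flatMap pvClean from
          pvFoldlAppend chunks []]
    rw [pvMain (chunks.flatMap pvClean) [] PySem.Set.empty PySem.Dict.empty 0
          (fun m => by simp [PySem.Dict.get?_empty, PySem.Set.empty])
          (fun m j hj => by rw [PySem.Dict.get?_empty] at hj; cases hj)]
    rfl
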